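-- pv_equiv track=rewrite | github.com/Srijan1972/COL215 | Assignment 5/op.py | can_take_common
-- ===== SOURCE A (Python) =====
-- def can_take_common(T1,T2):
--     assert(len(T1)==len(T2))
--     diff_count = 0
--     for i in range(len(T1)):
--         if T1[i]!=T2[i]:
--             diff_count += 1
--     if diff_count == 1:
--         i = 0
--         while i < len(T1) and T1[i] == T2[i]:
--             i += 1
--         return i
--     else:
--         return -1
-- ===== SOURCE B (Python) =====
-- def can_take_common(T1, T2):
--     assert(len(T1) == len(T2))
--     n = len(T1)
--     i = 0
--     while i < n and T1[i] == T2[i]: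
--         i += 1
--     if i == n:
--         return -1
--     j = n - 1
--     while T1[j] == T2[j]:
--         j -= 1
--     return i if i == j else -1
-- ===== Notes on version B (the rewrite author's own statement) =====
-- stated objective: alternative
-- what changed: Instead of counting all differences and then rescanning for the first one, B runs an early-exiting forward scan for the first differing index and a backward scan from the end for the last differing index, and returns the index iff the two scans meet.
import Mathlib
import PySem

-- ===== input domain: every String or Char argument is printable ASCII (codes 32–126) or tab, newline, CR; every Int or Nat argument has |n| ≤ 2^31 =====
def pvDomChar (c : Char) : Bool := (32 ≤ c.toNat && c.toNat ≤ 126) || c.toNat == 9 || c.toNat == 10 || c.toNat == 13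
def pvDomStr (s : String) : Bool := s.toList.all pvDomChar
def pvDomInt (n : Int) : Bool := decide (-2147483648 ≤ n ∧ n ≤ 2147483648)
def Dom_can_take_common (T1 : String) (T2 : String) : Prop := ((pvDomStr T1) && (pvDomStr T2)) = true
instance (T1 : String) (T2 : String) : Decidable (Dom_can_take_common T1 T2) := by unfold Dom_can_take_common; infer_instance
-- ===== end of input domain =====

-- B replaces A's count-all-differences pass plus rescan by two early-exiting boundary scans
-- (first differing index from the front, last differing index from the back), equal iff unique;
-- objective: alternative. Pre_ excludes unequal lengths, on which A's assert raises (B asserts too).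

-- ===== PORT A =====
-- A's while-loop `while i < len(T1) and T1[i] == T2[i]: i += 1`
def pvScanA (l1 l2 : List Char) (i : Nat) : Nat :=
  if h : i < l1.length ∧ l1[i]? = l2[i]? then pvScanA l1 l2 (i + 1) else i
termination_by l1.length - i
decreasing_by omega

def can_take_common (T1 : String) (T2 : String) : Int :=
  let l1 := T1.toList
  let l2 := T2.toList
  let diff_count := (List.range l1.length).foldl
    (fun c i => if l1[i]? ≠ l2[i]? then c + 1 else c) 0
  if diff_count = 1 then (pvScanA l1 l2 0 : Int) else -1

-- ===== PORT B =====
-- B's forward loop `while i < n and T1[i] == T2[i]: i += 1`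
def pvScanF (l1 l2 : List Char) (n i : Nat) : Nat :=
  if h : i < n ∧ l1[i]? = l2[i]? then pvScanF l1 l2 n (i + 1) else i
termination_by n - i
decreasing_by omega

-- B's backward loop `while T1[j] == T2[j]: j -= 1`; the `0 => 0` branch is unreachable in
-- can_take_common_alt (the loop is only entered when a differing index ≤ j exists).
def pvScanB (l1 l2 : List Char) (j : Nat) : Nat :=
  if l1[j]? = l2[j]? then
    match j with
    | 0 => 0
    | j' + 1 => pvScanB l1 l2 j'
  else j

def can_take_common_alt (T1 : String) (T2 : String) : Int :=
  let l1 := T1.toList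
  let l2 := T2.toList
  let n := l1.length
  let i := pvScanF l1 l2 n 0
  if i = n then -1
  else
    let j := pvScanB l1 l2 (n - 1)
    if i = j then (i : Int) else -1

-- ===== PRECONDITION & SPEC =====
-- Pre_ excludes exactly the inputs where A's (and B's) assert raises: unequal lengths.
def Pre_can_take_common (T1 : String) (T2 : String) : Prop := T1.toList.length = T2.toList.length
instance (T1 : String) (T2 : String) : Decidable (Pre_can_take_common T1 T2) := by
  unfold Pre_can_take_common; infer_instance

def pvWitness_can_take_common : String × String := ("abc", "axc")

def Spec_can_take_common (T1 : String) (T2 : String) (out : Int) : Prop := out = can_take_common_alt T1 T2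
instance (T1 : String) (T2 : String) (out : Int) : Decidable (Spec_can_take_common T1 T2 out) := by
  unfold Spec_can_take_common; infer_instance

-- ===== CLAIM (what is proved, stated in full; the proofs are below) =====
def Claim_equal_can_take_common : Prop := ∀ (T1 : String) (T2 : String), Dom_can_take_common T1 T2 → Pre_can_take_common T1 T2 → Spec_can_take_common T1 T2 (can_take_common T1 T2)

-- ===== LEMMAS AND PROOFS =====

-- the counting fold equals the length of the filtered index list
theorem pvCount_eq_filter_length (l1 l2 : List Char) (l : List Nat) (a : Nat) :
    l.foldl (fun c i => if l1[i]? ≠ l2[i]? then c + 1 else c) a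
      = a + (l.filter (fun i => decide (l1[i]? ≠ l2[i]?))).length := by
  induction l generalizing a with
  | nil => simp
  | cons x xs ih =>
    rw [List.foldl_cons, List.filter_cons]
    by_cases h : l1[x]? = l2[x]?
    · rw [if_neg (by simp [h]), if_neg (by simp [h]), ih]
    · rw [if_pos h, if_pos (by simpa using h), ih, List.length_cons]
      omega

-- A's rescan returns k when k is the least differing index
theorem pvScanA_finds (l1 l2 : List Char) (k : Nat)
    (hk : l1[k]? ≠ l2[k]?) (hkn : k < l1.length) :
    ∀ fuel i, k - i ≤ fuel → i ≤ k → (∀ j, i ≤ j → j < k → l1[j]? = l2[j]?) →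
      pvScanA l1 l2 i = k := by
  intro fuel
  induction fuel with
  | zero =>
    intro i h1 h2 _
    have hik : i = k := by omega
    subst hik
    rw [pvScanA, dif_neg (by tauto)]
  | succ fuel ih =>
    intro i h1 h2 hpre
    by_cases hik : i = k
    · subst hik
      rw [pvScanA, dif_neg (by tauto)]
    · have hlt : i < k := by omega
      rw [pvScanA, dif_pos ⟨by omega, hpre i le_rfl hlt⟩]
      exact ih (i + 1) (by omega) (by omega) (fun j hj hjk => hpre j (by omega) hjk)

-- B's forward scan returns n when no index in [i, n) differs
theorem pvScanF_all (l1 l2 : List Char) (n : Nat) :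
    ∀ fuel i, n - i ≤ fuel → i ≤ n → (∀ j, i ≤ j → j < n → l1[j]? = l2[j]?) →
      pvScanF l1 l2 n i = n := by
  intro fuel
  induction fuel with
  | zero =>
    intro i h1 h2 _
    have : i = n := by omega
    subst this
    rw [pvScanF, dif_neg (by omega)]
  | succ fuel ih =>
    intro i h1 h2 hpre
    by_cases hin : i = n
    · subst hin
      rw [pvScanF, dif_neg (by omega)]
    · have hlt : i < n := by omega
      rw [pvScanF, dif_pos ⟨hlt, hpre i le_rfl hlt⟩]
      exact ih (i + 1) (by omega) (by omega) (fun j hj hjn => hpre j (by omega) hjn)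

-- B's forward scan returns k when k is the least differing index
theorem pvScanF_finds (l1 l2 : List Char) (n k : Nat)
    (hk : l1[k]? ≠ l2[k]?) (hkn : k < n) :
    ∀ fuel i, k - i ≤ fuel → i ≤ k → (∀ j, i ≤ j → j < k → l1[j]? = l2[j]?) →
      pvScanF l1 l2 n i = k := by
  intro fuel
  induction fuel with
  | zero =>
    intro i h1 h2 _
    have hik : i = k := by omega
    subst hik
    rw [pvScanF, dif_neg (by tauto)]
  | succ fuel ih =>
    intro i h1 h2 hpre
    by_cases hik : i = k
    · subst hik
      rw [pvScanF, dif_neg (by tauto)]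
    · have hlt : i < k := by omega
      rw [pvScanF, dif_pos ⟨by omega, hpre i le_rfl hlt⟩]
      exact ih (i + 1) (by omega) (by omega) (fun j hj hjk => hpre j (by omega) hjk)

-- B's backward scan returns k when k is the greatest differing index ≤ j
theorem pvScanB_finds (l1 l2 : List Char) (k : Nat) (hk : l1[k]? ≠ l2[k]?) :
    ∀ fuel j, j - k ≤ fuel → k ≤ j → (∀ j', k < j' → j' ≤ j → l1[j']? = l2[j']?) →
      pvScanB l1 l2 j = k := by
  intro fuel
  induction fuel with
  | zero =>
    intro j h1 h2 _
    have : j = k := by omega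
    subst this
    rw [pvScanB.eq_def, if_neg hk]
  | succ fuel ih =>
    intro j h1 h2 hpost
    by_cases hjk : j = k
    · subst hjk
      rw [pvScanB.eq_def, if_neg hk]
    · have hlt : k < j := by omega
      obtain ⟨j', rfl⟩ : ∃ j', j = j' + 1 := ⟨j - 1, by omega⟩
      rw [pvScanB.eq_def, if_pos (hpost (j' + 1) hlt le_rfl)]
      exact ih j' (by omega) (by omega) (fun x hx hx' => hpost x hx (by omega))

-- a nodup list whose elements all equal f and which contains f is [f]
theorem pvSingleton_of (l : List Nat) (f : Nat) (hn : l.Nodup) (hmem : f ∈ l)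
    (hall : ∀ x ∈ l, x = f) : l = [f] := by
  cases l with
  | nil => cases hmem
  | cons a t =>
    have ha : a = f := hall a List.mem_cons_self
    subst ha
    have ht : t = [] := by
      rw [List.eq_nil_iff_forall_not_mem]
      intro x hx
      have := hall x (List.mem_cons_of_mem _ hx)
      subst this
      exact (List.nodup_cons.mp hn).1 hx
    rw [ht]

-- ===== VERDICT (by name: the statement is the Claim_ definition above) =====
theorem can_take_common_spec : Claim_equal_can_take_common := by
  intro T1 T2 _ hpre
  unfold Spec_can_take_common can_take_common can_take_common_alt
  simp only
  unfold Pre_can_take_common at hpre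
  set l1 := T1.toList with hl1
  set l2 := T2.toList with hl2
  set n := l1.length with hn
  have hlen : l2.length = n := hpre.symm
  rw [pvCount_eq_filter_length]
  simp only [Nat.zero_add]
  by_cases hall : ∀ j, j < n → l1[j]? = l2[j]?
  · -- no differing index: both return -1
    have hF : (List.range n).filter (fun i => decide (l1[i]? ≠ l2[i]?)) = [] := by
      rw [List.filter_eq_nil_iff]
      intro a ha
      simp [hall a (List.mem_range.mp ha)]
    rw [hF]
    rw [pvScanF_all l1 l2 n n 0 (by omega) (by omega) (fun j _ hj => hall j hj)]
    simp
  · push_neg at hall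
    obtain ⟨w, hwn, hw⟩ := hall
    have hd : ∀ k, l1[k]? ≠ l2[k]? → k < n := by
      intro k hk
      by_contra h
      exact hk (by rw [List.getElem?_eq_none (by omega), List.getElem?_eq_none (by omega)])
    -- f = least differing index, m = greatest differing index
    have hexw : ∃ k, l1[k]? ≠ l2[k]? := ⟨w, hw⟩
    set f := Nat.find hexw with hf
    have hdf : l1[f]? ≠ l2[f]? := Nat.find_spec hexw
    have hfn : f < n := hd f hdf
    have hfmin : ∀ j, j < f → l1[j]? = l2[j]? := by
      intro j hj
      by_contra hc
      have h := Nat.find_min' hexw hc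
      rw [← hf] at h
      omega
    set m := Nat.findGreatest (fun k => l1[k]? ≠ l2[k]?) (n - 1) with hm
    have hdm : l1[m]? ≠ l2[m]? := by
      have h := Nat.findGreatest_spec (P := fun k => l1[k]? ≠ l2[k]?) (n := n - 1) (m := w)
        (by omega) hw
      rwa [← hm] at h
    have hmn : m < n := hd m hdm
    have hmmax : ∀ j, m < j → j ≤ n - 1 → l1[j]? = l2[j]? := by
      intro j hj hj'
      by_contra hc
      rw [hm] at hj
      exact Nat.findGreatest_is_greatest hj hj' hc
    have hfm : f ≤ m := by
      by_contra h
      exact hdf (hmmax f (by omega) (by omega))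
    have hFmem : ∀ x, x ∈ (List.range n).filter (fun i => decide (l1[i]? ≠ l2[i]?)) ↔
        (x < n ∧ l1[x]? ≠ l2[x]?) := by
      intro x
      rw [List.mem_filter, List.mem_range]
      simp
    have hscanF := pvScanF_finds l1 l2 n f hdf hfn f 0 (by omega) (by omega)
      (fun j _ hj => hfmin j hj)
    have hscanB := pvScanB_finds l1 l2 m hdm (n - 1) (n - 1) (by omega) (by omega)
      (fun j' hj' hj'' => hmmax j' hj' hj'')
    rw [hscanF, hscanB]
    by_cases hfe : f = m
    · -- unique differing index: both return f
      have hF : (List.range n).filter (fun i => decide (l1[i]? ≠ l2[i]?)) = [f] := by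
        apply pvSingleton_of _ _ (List.Nodup.filter _ (List.nodup_range))
        · exact (hFmem f).mpr ⟨hfn, hdf⟩
        · intro x hx
          obtain ⟨hx1, hx2⟩ := (hFmem x).mp hx
          have h1 : f ≤ x := by
            have h := Nat.find_min' hexw hx2
            rw [← hf] at h
            exact h
          have h2 : x ≤ m := by
            by_contra h
            exact hx2 (hmmax x (by omega) (by omega))
          omega
      rw [hF]
      rw [pvScanA_finds l1 l2 f hdf (by omega) f 0 (by omega) (by omega)
        (fun j _ hj => hfmin j hj)]
      rw [if_pos (by simp), if_neg (by omega : ¬ f = n), if_pos hfe, hfe]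
    · -- at least two differing indices: both return -1
      have hne1 : ((List.range n).filter (fun i => decide (l1[i]? ≠ l2[i]?))).length ≠ 1 := by
        intro h1
        obtain ⟨k, hk⟩ := List.length_eq_one_iff.mp h1
        have h2 : f = k := by
          have := (hFmem f).mpr ⟨hfn, hdf⟩
          rw [hk] at this
          exact List.mem_singleton.mp this
        have h3 : m = k := by
          have := (hFmem m).mpr ⟨hmn, hdm⟩
          rw [hk] at this
          exact List.mem_singleton.mp this
        exact hfe (h2.trans h3.symm)
      rw [if_neg hne1, if_neg (by omega : ¬ f = n), if_neg hfe]
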